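-- pv_equiv track=rewrite | github.com/jussiiih/Python-ohjelmointia-tehokkailla-tietorakenteilla-ja-algoritmeilla | fliptwo.py | solve
-- ===== SOURCE A (Python) =====
-- from collections import deque
--
-- def solve(n,k):
--     lista = deque()
--     for i in range (1, n+1):
--         lista.append(i)
--
--     for i in range (0, k):
--         otettu1 = lista.popleft()
--         otettu2 = lista.popleft()
--         lista.append(otettu2)
--         lista.append(otettu1)
--     return lista[0]
-- ===== SOURCE B (Python) =====
-- def solve(n, k):
--     # Closed form: the deque walk is periodic, so the front element is a
--     # direct modular function of k (negative k, like range(0, k), means no operations).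
--     ops = k if k > 0 else 0
--     if n % 2 == 1:
--         return (2 * ops) % (n + 1) + 1
--     j = (2 * ops) % (2 * n)
--     return j + 1 if j < n else j - n + 2
-- ===== Notes on version B (the rewrite author's own statement) =====
-- stated objective: faster
-- what changed: Replaced the O(n+k) deque simulation by an O(1) closed-form modular formula for the front element (period n+1 for odd n, 2n for even n).
import Mathlib
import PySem

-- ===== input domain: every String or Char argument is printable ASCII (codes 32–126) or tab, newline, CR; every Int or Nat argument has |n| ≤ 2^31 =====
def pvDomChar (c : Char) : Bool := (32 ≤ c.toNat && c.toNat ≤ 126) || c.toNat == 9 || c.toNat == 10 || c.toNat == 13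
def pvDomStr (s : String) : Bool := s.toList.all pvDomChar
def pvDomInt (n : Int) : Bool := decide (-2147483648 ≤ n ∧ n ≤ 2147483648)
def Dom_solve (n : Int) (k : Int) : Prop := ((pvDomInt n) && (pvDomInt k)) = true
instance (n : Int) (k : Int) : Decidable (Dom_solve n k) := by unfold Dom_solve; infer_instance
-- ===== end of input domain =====

-- B replaces A's O(n+k) deque simulation by an O(1) closed-form modular formula for the front element.

-- ===== PORT A =====
-- collections.deque ported as the classic two-list functional deque:
-- O(1) append (cons on back), amortized O(1) popleft (reverse back when front empties)
def dqPush (d : List Int × List Int) (x : Int) : List Int × List Int := (d.1, x :: d.2)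

def dqPop? (d : List Int × List Int) : Option (Int × (List Int × List Int)) :=
  match d.1 with
  | x :: f => some (x, (f, d.2))
  | [] =>
    match d.2.reverse with
    | x :: f => some (x, (f, []))
    | [] => none

def dqToList (d : List Int × List Int) : List Int := d.1 ++ d.2.reverse

-- one pass of A's inner loop: popleft twice, append the two elements swapped
-- (the 'none' branches are where Python raises IndexError; excluded by Pre_solve)
def solveStepDq (d : List Int × List Int) : List Int × List Int :=
  match dqPop? d with
  | none => d
  | some (otettu1, d1) =>
    match dqPop? d1 with
    | none => d1
    | some (otettu2, d2) => dqPush (dqPush d2 otettu2) otettu1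

def solve (n : Int) (k : Int) : Int :=
  let lista := (PySem.List.pyRange 1 (n + 1) 1).foldl dqPush ([], [])
  let final := (PySem.List.pyRange 0 k 1).foldl (fun d _ => solveStepDq d) lista
  PySem.List.pyGetD (dqToList final) 0 0   -- lista[0]; the empty deque raises IndexError (excluded by Pre_solve)

-- ===== PORT B =====
def solve_alt (n : Int) (k : Int) : Int :=
  let ops := if k > 0 then k else 0
  if PySem.Int.mod n 2 = 1 then
    PySem.Int.mod (2 * ops) (n + 1) + 1
  else
    let j := PySem.Int.mod (2 * ops) (2 * n)
    if j < n then j + 1 else j - n + 2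

-- ===== PRECONDITION & SPEC =====
-- exactly where A returns: IndexError on n < 1 (empty deque) and on n = 1 with k > 0 (second popleft)
def Pre_solve (n : Int) (k : Int) : Prop := 1 ≤ n ∧ (2 ≤ n ∨ k ≤ 0)
instance (n : Int) (k : Int) : Decidable (Pre_solve n k) := by unfold Pre_solve; infer_instance
def pvWitness_solve : Int × Int := (3, 2)
def Spec_solve (n : Int) (k : Int) (out : Int) : Prop := out = solve_alt n k
instance (n : Int) (k : Int) (out : Int) : Decidable (Spec_solve n k out) := by unfold Spec_solve; infer_instance

-- ===== CLAIM (what is proved, stated in full; the proofs are below) =====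
def Claim_equal_solve : Prop := ∀ (n : Int) (k : Int), Dom_solve n k → Pre_solve n k → Spec_solve n k (solve n k)

-- ===== LEMMAS AND PROOFS =====

-- proof-side abstraction of one operation on the deque's value as a plain list
def solveStep (l : List Int) : List Int :=
  match l with
  | a :: b :: t => t ++ [b, a]
  | _ => l

lemma dq_step (d : List Int × List Int) (h : 2 ≤ (dqToList d).length) :
    dqToList (solveStepDq d) = solveStep (dqToList d) := by
  obtain ⟨f, bl⟩ := d
  rcases f with _ | ⟨x, f'⟩
  · rcases hr : bl.reverse with _ | ⟨x, r⟩
    · simp [dqToList, hr] at h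
    · rcases r with _ | ⟨y, r'⟩
      · simp [dqToList, hr] at h
      · simp [solveStepDq, dqPop?, dqPush, dqToList, hr, solveStep]
  · rcases f' with _ | ⟨y, f''⟩
    · rcases hr : bl.reverse with _ | ⟨y, r⟩
      · simp [dqToList, hr] at h
      · simp [solveStepDq, dqPop?, dqPush, dqToList, hr, solveStep]
    · simp [solveStepDq, dqPop?, dqPush, dqToList, solveStep]

lemma dq_build (xs : List Int) (d : List Int × List Int) :
    dqToList (xs.foldl dqPush d) = dqToList d ++ xs := by
  induction xs generalizing d with
  | nil => simp
  | cons x t ih =>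
    rw [List.foldl_cons, ih]
    simp [dqPush, dqToList, List.append_assoc]

-- the infinite sequence the deque slides over: positions 0..n-1 hold 1..n, and each
-- operation appends the two popped front values swapped: S (n+2t) = S (2t+1), S (n+2t+1) = S (2t)
def seqS (n : Nat) (i : Nat) : Int :=
  if _h1 : i < n then (i : Int) + 1
  else if _h2 : n ≤ 1 then 0
  else if (i - n) % 2 = 0 then seqS n (i - n + 1) else seqS n (i - n - 1)
decreasing_by all_goals omega

lemma seqS_base (n i : Nat) (h : i < n) : seqS n i = (i : Int) + 1 := by
  unfold seqS; simp [h]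

lemma seqS_rec (n i : Nat) (h1 : n ≤ i) (h2 : 2 ≤ n) :
    seqS n i = if (i - n) % 2 = 0 then seqS n (i - n + 1) else seqS n (i - n - 1) := by
  rw [seqS]
  rw [dif_neg (by omega), dif_neg (by omega)]

-- the deque after j operations is the window S[2j .. 2j+n-1]
def window (n j : Nat) : List Int := (List.range n).map (fun t => seqS n (2 * j + t))

-- closed form for seqS (only even i is used for the final answer; odd i is needed by the induction)
def closedG (n i : Nat) : Int :=
  if n % 2 = 1 then
    if i % 2 = 0 then ((i % (n + 1) : Nat) : Int) + 1 else ((i % (n - 1) : Nat) : Int) + 1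
  else
    if i % (2 * n) < n then ((i % (2 * n) : Nat) : Int) + 1
    else if i % 2 = 0 then ((i % (2 * n) : Nat) : Int) - n + 2
    else ((i % (2 * n) : Nat) : Int) - n

lemma closedG_period_odd_even (n d : Nat) (hn : n % 2 = 1) (hd : d % 2 = 0) :
    closedG n (d + (n + 1)) = closedG n d := by
  unfold closedG
  have e2 : (d + (n + 1)) % 2 = d % 2 := by omega
  rw [if_pos hn, if_pos hn, e2, hd, if_pos rfl, if_pos rfl, Nat.add_mod_right]

lemma closedG_period_odd_odd (n d : Nat) (hn : n % 2 = 1) (hd : d % 2 = 1) :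
    closedG n (d + (n - 1)) = closedG n d := by
  unfold closedG
  have e2 : (d + (n - 1)) % 2 = d % 2 := by omega
  rw [if_pos hn, if_pos hn, e2, hd, if_neg (by omega), if_neg (by omega), Nat.add_mod_right]

lemma closedG_period_even (n d : Nat) (hn : n % 2 = 0) :
    closedG n (d + 2 * n) = closedG n d := by
  unfold closedG
  have e2 : (d + 2 * n) % 2 = d % 2 := by omega
  rw [if_neg (show ¬ n % 2 = 1 by omega), if_neg (show ¬ n % 2 = 1 by omega)]
  simp only [Nat.add_mod_right, e2]

lemma seqS_eq_closedG (n : Nat) (hn : 2 ≤ n) : ∀ i, seqS n i = closedG n i := by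
  intro i
  induction i using Nat.strong_induction_on with
  | _ i ih =>
    by_cases hin : i < n
    · rw [seqS_base n i hin]
      unfold closedG
      by_cases hno : n % 2 = 1
      · rw [if_pos hno]
        by_cases hie : i % 2 = 0
        · rw [if_pos hie, Nat.mod_eq_of_lt (by omega)]
        · rw [if_neg hie, Nat.mod_eq_of_lt (by omega)]
      · rw [if_neg hno, Nat.mod_eq_of_lt (show i < 2 * n by omega), if_pos hin]
    · by_cases hno : n % 2 = 1
      · by_cases hie : i % 2 = 0
        · -- odd n, even i: step n+1
          obtain ⟨d, rfl⟩ : ∃ d, i = d + (n + 1) := ⟨i - (n + 1), by omega⟩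
          rw [seqS_rec n _ (by omega) hn, if_neg (by omega)]
          have e : d + (n + 1) - n - 1 = d := by omega
          rw [e, ih d (by omega), closedG_period_odd_even n d hno (by omega)]
        · -- odd n, odd i: step n-1
          obtain ⟨d, rfl⟩ : ∃ d, i = d + (n - 1) := ⟨i - (n - 1), by omega⟩
          rw [seqS_rec n _ (by omega) hn, if_pos (by omega)]
          have e : d + (n - 1) - n + 1 = d := by omega
          rw [e, ih d (by omega), closedG_period_odd_odd n d hno (by omega)]
      · by_cases h2n : i < 2 * n
        · -- even n, n ≤ i < 2n: one unfold reaches the base segment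
          rw [seqS_rec n i (by omega) hn]
          by_cases hie : i % 2 = 0
          · rw [if_pos (by omega), seqS_base n _ (by omega)]
            unfold closedG
            rw [if_neg hno, Nat.mod_eq_of_lt h2n, if_neg (by omega), if_pos hie]
            omega
          · rw [if_neg (by omega), seqS_base n _ (by omega)]
            unfold closedG
            rw [if_neg hno, Nat.mod_eq_of_lt h2n, if_neg (by omega), if_neg hie]
            omega
        · -- even n, i ≥ 2n: two unfolds give step 2n
          obtain ⟨d, rfl⟩ : ∃ d, i = d + 2 * n := ⟨i - 2 * n, by omega⟩
          by_cases hie : (d + 2 * n) % 2 = 0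
          · rw [seqS_rec n _ (by omega) hn, if_pos (by omega)]
            have e1 : d + 2 * n - n + 1 = d + n + 1 := by omega
            rw [e1, seqS_rec n _ (by omega) hn, if_neg (by omega)]
            have e2 : d + n + 1 - n - 1 = d := by omega
            rw [e2, ih d (by omega), closedG_period_even n d (by omega)]
          · rw [seqS_rec n _ (by omega) hn, if_neg (by omega)]
            have e1 : d + 2 * n - n - 1 = d + n - 1 := by omega
            rw [e1, seqS_rec n _ (by omega) hn, if_pos (by omega)]
            have e2 : d + n - 1 - n + 1 = d := by omega
            rw [e2, ih d (by omega), closedG_period_even n d (by omega)]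

lemma range_map_shift {α : Type} (f : Nat → α) (m : Nat) :
    (List.range (m + 2)).map f = f 0 :: f 1 :: (List.range m).map (fun t => f (t + 2)) := by
  apply List.ext_getElem
  · simp
  · intro i h1 h2
    rcases i with _ | _ | i <;> simp

lemma range_map_last2 {α : Type} (f : Nat → α) (m : Nat) :
    (List.range (m + 2)).map f = (List.range m).map f ++ [f m, f (m + 1)] := by
  rw [show m + 2 = m + 1 + 1 from rfl, List.range_succ, List.range_succ]
  simp

lemma window_step (n : Nat) (hn : 2 ≤ n) (j : Nat) :
    solveStep (window n j) = window n (j + 1) := by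
  obtain ⟨m, rfl⟩ : ∃ m, n = m + 2 := ⟨n - 2, by omega⟩
  unfold window
  rw [range_map_shift (fun t => seqS (m + 2) (2 * j + t)) m,
      range_map_last2 (fun t => seqS (m + 2) (2 * (j + 1) + t)) m]
  simp only [solveStep]
  congr 1
  · apply List.map_congr_left
    intro t _
    congr 1
    omega
  · have h1 : seqS (m + 2) (2 * (j + 1) + m) = seqS (m + 2) (2 * j + 1) := by
      rw [seqS_rec (m + 2) _ (by omega) (by omega), if_pos (by omega)]
      congr 1
      omega
    have h2 : seqS (m + 2) (2 * (j + 1) + (m + 1)) = seqS (m + 2) (2 * j) := by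
      rw [seqS_rec (m + 2) _ (by omega) (by omega), if_neg (by omega)]
      congr 1
      omega
    rw [h1, h2]
    norm_num

lemma dq_iterate_window (n : Nat) (hn : 2 ≤ n) (d0 : List Int × List Int)
    (h0 : dqToList d0 = window n 0) (j : Nat) :
    dqToList (solveStepDq^[j] d0) = window n j := by
  induction j with
  | zero => simpa using h0
  | succ m ih =>
    rw [Function.iterate_succ_apply', dq_step _ (by rw [ih]; simpa [window] using hn), ih,
        window_step n hn m]

lemma foldl_const_iterate {α β : Type} (f : α → α) (xs : List β) (a : α) :
    xs.foldl (fun l _ => f l) a = f^[xs.length] a := by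
  induction xs generalizing a with
  | nil => rfl
  | cons x t ih => simp [List.foldl_cons, ih, Function.iterate_succ_apply]

lemma build_eq_window (n : Nat) :
    dqToList ((PySem.List.pyRange 1 ((n : Int) + 1) 1).foldl dqPush ([], [])) = window n 0 := by
  have h0 : dqToList ((PySem.List.pyRange 1 ((n : Int) + 1) 1).foldl dqPush ([], []))
      = PySem.List.pyRange 1 ((n : Int) + 1) 1 := by rw [dq_build]; rfl
  rw [h0, PySem.List.pyRange_one]
  unfold window
  have e : ((n : Int) + 1 - 1).toNat = n := by omega
  rw [e]
  apply List.map_congr_left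
  intro t ht
  rw [seqS_base n (2 * 0 + t) (by have := List.mem_range.mp ht; omega)]
  omega

-- ===== VERDICT (by name: the statement is the Claim_ definition above) =====
theorem solve_spec : Claim_equal_solve := by
  unfold Claim_equal_solve
  intro n k _ hpre
  unfold Spec_solve
  obtain ⟨hn1, hrest⟩ := hpre
  obtain ⟨n', rfl⟩ : ∃ m : Nat, (m : Int) = n := ⟨n.toNat, Int.toNat_of_nonneg (by omega)⟩
  have hops : (if k > 0 then k else 0) = ((k.toNat : Int)) := by
    split_ifs with h <;> omega
  by_cases hn2 : 2 ≤ n'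
  · -- main case: n ≥ 2
    have hA : solve (n' : Int) k = seqS n' (2 * k.toNat) := by
      simp only [solve]
      rw [foldl_const_iterate, PySem.List.length_pyRange_one]
      have e1 : (k - 0).toNat = k.toNat := by omega
      rw [e1, dq_iterate_window n' hn2 _ (build_eq_window n') k.toNat]
      unfold window
      obtain ⟨m, hm⟩ : ∃ m, n' = m + 1 := ⟨n' - 1, by omega⟩
      rw [hm, List.range_succ_eq_map, List.map_cons, PySem.List.pyGetD_zero_cons]
      rw [← hm]
      norm_num
    have hm2 : PySem.Int.mod ((n' : Nat) : Int) 2 = ((n' % 2 : Nat) : Int) := by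
      rw [PySem.Int.mod_eq_emod_of_pos (by norm_num)]
      exact_mod_cast (Int.natCast_mod n' 2).symm
    have hB : solve_alt (n' : Int) k = closedG n' (2 * k.toNat) := by
      simp only [solve_alt]
      rw [hops, hm2]
      by_cases hpar : n' % 2 = 1
      · rw [hpar, if_pos (by norm_num)]
        unfold closedG
        rw [if_pos hpar, if_pos (by omega)]
        rw [show (2 * ((k.toNat : Nat) : Int)) = ((2 * k.toNat : Nat) : Int) by push_cast; ring,
            show ((n' : Nat) : Int) + 1 = ((n' + 1 : Nat) : Int) by push_cast; ring,
            PySem.Int.mod_natCast]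
      · have hpar0 : n' % 2 = 0 := by omega
        rw [hpar0, if_neg (by norm_num)]
        unfold closedG
        rw [if_neg hpar]
        rw [show (2 * ((k.toNat : Nat) : Int)) = ((2 * k.toNat : Nat) : Int) by push_cast; ring,
            show 2 * ((n' : Nat) : Int) = ((2 * n' : Nat) : Int) by push_cast; ring,
            PySem.Int.mod_natCast]
        set jn : Nat := (2 * k.toNat) % (2 * n') with hj
        by_cases hlt : jn < n'
        · rw [if_pos (by exact_mod_cast hlt), if_pos hlt]
        · rw [if_neg (by exact_mod_cast hlt), if_neg hlt, if_pos (by omega)]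
    rw [hA, hB, seqS_eq_closedG n' hn2]
  · -- n = 1 (Pre_ forces k ≤ 0: the loop does not run)
    have hn'1 : n' = 1 := by omega
    have hk0 : k ≤ 0 := by
      rcases hrest with h | h
      · exfalso; omega
      · exact h
    subst hn'1
    simp only [solve, solve_alt]
    rw [PySem.List.pyRange_one_eq_nil (by omega : (k : Int) ≤ 0)]
    simp only [List.foldl_nil]
    rw [hops]
    have e0 : k.toNat = 0 := by omega
    rw [e0]
    decide
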